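-- pv_equiv track=rewrite | github.com/Darshil-Solanki/LeetCode | contest/countMonobitIntegers.py | countMonobit
-- ===== SOURCE A (Python) =====
-- def countMonobit(n: int) -> int:
--     ans = 1
--     def all_one(num):
--         return len(bin(num))-2 == bin(num).count("1")
--
--     for i in range(1, n+1):
--         if all_one(i):
--             ans += 1
--     return ans
-- ===== SOURCE B (Python) =====
-- def countMonobit(n: int) -> int:
--     # count of all-ones binary integers up to n, plus one:
--     # this is the bit length of n plus one when n is positive.
--     if n < 1:
--         return 1
--     return (n + 1).bit_length()
-- ===== Notes on version B (the rewrite author's own statement) =====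
-- stated objective: faster
-- what changed: Replaced the scan of all integers from one to n via their binary string representations by the closed form bit_length of n plus one, since the all-ones binary numbers are exactly the powers of two minus one.
import Mathlib
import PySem

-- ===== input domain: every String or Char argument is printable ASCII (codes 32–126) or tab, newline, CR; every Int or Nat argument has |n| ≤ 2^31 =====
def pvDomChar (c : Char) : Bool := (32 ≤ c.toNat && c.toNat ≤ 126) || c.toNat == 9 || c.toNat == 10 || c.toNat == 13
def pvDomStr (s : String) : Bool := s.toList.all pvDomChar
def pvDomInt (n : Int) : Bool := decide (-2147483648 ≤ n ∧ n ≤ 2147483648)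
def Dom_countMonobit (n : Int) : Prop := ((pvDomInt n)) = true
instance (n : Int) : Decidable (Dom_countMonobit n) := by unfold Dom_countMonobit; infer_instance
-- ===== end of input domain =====

-- B replaces A's per-integer binary-string scan by the closed form bit_length of n plus one; faster.

-- ===== PORT A =====
-- hand port of Python's bin(num) digit part, MSB first (exact for num ≥ 0 digits)
def natBinDigits : Nat → List Char
  | 0 => []
  | n+1 => natBinDigits ((n+1)/2) ++ [if (n+1) % 2 = 1 then '1' else '0']
decreasing_by exact Nat.div_lt_self (Nat.succ_pos n) (by norm_num)

-- hand port of bin(num) : the exact character list of Python's bin()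
def binChars (num : Int) : List Char :=
  if num < 0 then '-' :: '0' :: 'b' :: natBinDigits (-num).toNat
  else if num = 0 then ['0', 'b', '0']
  else '0' :: 'b' :: natBinDigits num.toNat

-- len(bin(num))-2 == bin(num).count("1"); counting the 1-char substring "1" = counting the char '1' (exact)
def all_one (num : Int) : Bool :=
  ((binChars num).length : Int) - 2 == ((binChars num).count '1' : Int)

def countMonobit (n : Int) : Int :=
  (PySem.List.pyRange 1 (n + 1) 1).foldl (fun ans i => if all_one i then ans + 1 else ans) 1

-- ===== PORT B =====
-- hand port of int.bit_length() for nonnegative ints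
def bitLen : Nat → Nat
  | 0 => 0
  | n+1 => bitLen ((n+1)/2) + 1
decreasing_by exact Nat.div_lt_self (Nat.succ_pos n) (by norm_num)

def countMonobit_alt (n : Int) : Int :=
  if n < 1 then 1 else (bitLen (n + 1).toNat : Int)

-- ===== PRECONDITION & SPEC =====
def Spec_countMonobit (n : Int) (out : Int) : Prop := out = countMonobit_alt n
instance (n : Int) (out : Int) : Decidable (Spec_countMonobit n out) := by unfold Spec_countMonobit; infer_instance

-- ===== CLAIM (what is proved, stated in full; the proofs are below) =====
def Claim_equal_countMonobit : Prop := ∀ (n : Int), Dom_countMonobit n → Spec_countMonobit n (countMonobit n)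

-- ===== LEMMAS AND PROOFS =====

theorem size_succ_div2 (m : Nat) : Nat.size (m + 1) = Nat.size ((m + 1) / 2) + 1 := by
  have h2 : Nat.bit (decide ((m + 1) % 2 = 1)) ((m + 1) / 2) = m + 1 := by
    rw [Nat.bit_val]
    rcases Nat.mod_two_eq_zero_or_one (m + 1) with h | h <;> simp [h] <;> omega
  calc Nat.size (m + 1) = Nat.size (Nat.bit (decide ((m + 1) % 2 = 1)) ((m + 1) / 2)) := by rw [h2]
    _ = Nat.size ((m + 1) / 2) + 1 := Nat.size_bit (by rw [h2]; omega)

theorem bitLen_eq_size : ∀ n : Nat, bitLen n = Nat.size n := by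
  intro n
  induction n using Nat.strong_induction_on with
  | _ n ih =>
    match n with
    | 0 => simp [bitLen]
    | Nat.succ m =>
      rw [bitLen, ih ((m+1)/2) (Nat.div_lt_self (Nat.succ_pos m) (by norm_num)), size_succ_div2]

theorem len_digits : ∀ n : Nat, (natBinDigits n).length = bitLen n := by
  intro n
  induction n using Nat.strong_induction_on with
  | _ n ih =>
    match n with
    | 0 => simp [natBinDigits, bitLen]
    | Nat.succ m =>
      rw [natBinDigits, bitLen]
      simp [ih ((m+1)/2) (Nat.div_lt_self (Nat.succ_pos m) (by norm_num))]

theorem ones_iff : ∀ n : Nat,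
    ((natBinDigits n).count '1' = (natBinDigits n).length ↔ n + 1 = 2 ^ (natBinDigits n).length) := by
  intro n
  induction n using Nat.strong_induction_on with
  | _ n ih =>
    match n with
    | 0 => simp [natBinDigits]
    | Nat.succ m =>
      rw [natBinDigits]
      have ih2 := ih ((m+1)/2) (Nat.div_lt_self (Nat.succ_pos m) (by norm_num))
      have hle : (natBinDigits ((m+1)/2)).count '1' ≤ (natBinDigits ((m+1)/2)).length :=
        List.count_le_length
      have hdm : m + 1 = 2 * ((m+1)/2) + (m+1) % 2 := (Nat.div_add_mod (m+1) 2).symm ▸ by omega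
      by_cases hmod : (m+1) % 2 = 1
      · rw [if_pos hmod]
        simp only [List.count_append, List.length_append]
        simp only [List.count_singleton, List.length_singleton]
        constructor
        · intro h
          have h1 : (natBinDigits ((m+1)/2)).count '1' = (natBinDigits ((m+1)/2)).length := by
            simp at h; omega
          have := ih2.mp h1
          rw [pow_succ]
          omega
        · intro h
          rw [pow_succ] at h
          have h1 : (m+1)/2 + 1 = 2 ^ (natBinDigits ((m+1)/2)).length := by omega
          have := ih2.mpr h1
          simp
          omega
      · have hmod0 : (m+1) % 2 = 0 := by omega
        rw [if_neg hmod]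
        simp only [List.count_append, List.length_append, List.length_singleton]
        have hc : List.count '1' ['0'] = 0 := by decide
        rw [hc]
        constructor
        · intro h; omega
        · intro h
          rw [pow_succ] at h
          omega

theorem all_one_pos (j : Nat) :
    all_one ((j : Int) + 1) = decide ((j + 1) + 1 = 2 ^ bitLen (j + 1)) := by
  have ht : ((j : Int) + 1).toNat = j + 1 := by omega
  unfold all_one binChars
  rw [if_neg (by omega), if_neg (by omega), ht]
  rw [Bool.eq_iff_iff]
  simp only [beq_iff_eq, decide_eq_true_eq, List.length_cons, List.count_cons]
  rw [if_neg (show ¬('b' = '1') by decide), if_neg (show ¬('0' = '1') by decide)]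
  have hlen := len_digits (j + 1)
  have hiff := ones_iff (j + 1)
  have hle : (natBinDigits (j + 1)).count '1' ≤ (natBinDigits (j + 1)).length :=
    List.count_le_length
  rw [hlen] at hiff hle
  constructor
  · intro h
    have hc : (natBinDigits (j + 1)).count '1' = bitLen (j + 1) := by push_cast at h; omega
    exact hiff.mp hc
  · intro h
    have hc : (natBinDigits (j + 1)).count '1' = bitLen (j + 1) := hiff.mpr h
    push_cast
    omega

theorem bitLen_succ_step (j : Nat) :
    bitLen (j + 2) = if (j + 2) = 2 ^ (bitLen (j + 1)) then bitLen (j + 1) + 1 else bitLen (j + 1) := by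
  rw [bitLen_eq_size, bitLen_eq_size]
  split_ifs with h
  · rw [h, Nat.size_pow]
  · have hlt : j + 1 < 2 ^ Nat.size (j + 1) := Nat.size_le.mp le_rfl
    have h2 : j + 2 < 2 ^ Nat.size (j + 1) := by omega
    exact le_antisymm (Nat.size_le.mpr h2) (Nat.size_le_size (by omega))

theorem main_lemma : ∀ m : Nat,
    (PySem.List.pyRange 1 ((m : Int) + 1) 1).foldl
      (fun ans i => if all_one i then ans + 1 else ans) 1 = (bitLen (m + 1) : Int) := by
  intro m
  induction m with
  | zero =>
    rw [PySem.List.pyRange_one_eq_nil (by norm_num)]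
    simp [bitLen]
  | succ k ih =>
    have hcast : ((k + 1 : Nat) : Int) + 1 = ((k : Int) + 1) + 1 := by push_cast; ring
    rw [hcast, PySem.List.pyRange_one_succ_right (by omega), List.foldl_append]
    simp only [List.foldl_cons, List.foldl_nil]
    rw [ih]
    have hao : all_one ((k : Int) + 1) = decide ((k + 1) + 1 = 2 ^ bitLen (k + 1)) := all_one_pos k
    rw [hao, bitLen_succ_step k]
    have hkk : k + 1 + 1 = k + 2 := rfl
    rw [hkk]
    by_cases h : (k + 2) = 2 ^ bitLen (k + 1)
    · simp [h]
    · simp [h]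

-- ===== VERDICT (by name: the statement is the Claim_ definition above) =====
theorem countMonobit_spec : Claim_equal_countMonobit := by
  intro n _
  unfold Spec_countMonobit countMonobit countMonobit_alt
  by_cases h : n < 1
  · rw [PySem.List.pyRange_one_eq_nil (by omega), if_pos h]
    rfl
  · have h1 : 1 ≤ n := by omega
    have hn : n = ((n.toNat : Nat) : Int) := by omega
    clear h
    rw [if_neg (by omega)]
    rw [hn]
    rw [main_lemma n.toNat]
    congr 1
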